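-- pv_equiv track=rewrite | github.com/shagun30/djambala-2 | resource/utils.py | add_periods_endtime
-- ===== SOURCE A (Python) =====
-- def add_periods_endtime( l):
--   """ Fuegt Endzeitpunkte der Zeitspannen ein """
--   l.reverse()
--   old = u"24:00"
--   #for i in l[:]:
--   for i in l:
--     i.append(old)
--     old = i[0]
--   l.reverse()
--   return l
-- ===== SOURCE B (Python) =====
-- def add_periods_endtime(l):
--     """ Fuegt Endzeitpunkte der Zeitspannen ein """
--     for cur, nxt in zip(l, l[1:]):
--         cur.append(nxt[0])
--     if l:
--         l[-1].append(u"24:00")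
--     return l
-- ===== Notes on version B (the rewrite author's own statement) =====
-- stated objective: idiomatic
-- what changed: A reverses the list, threads the previous entry's start time through an accumulator while walking backwards, and reverses back; B makes one forward pairwise pass (zip of the list with its tail) appending each next entry's start time, then appends "24:00" to the last entry.
-- outside the precondition, e.g. on add_periods_endtime([['a'], [], ['b']]): A returns [['a', 'b'], ['b'], ['b', '24:00']], B raises IndexError
import Mathlib
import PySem

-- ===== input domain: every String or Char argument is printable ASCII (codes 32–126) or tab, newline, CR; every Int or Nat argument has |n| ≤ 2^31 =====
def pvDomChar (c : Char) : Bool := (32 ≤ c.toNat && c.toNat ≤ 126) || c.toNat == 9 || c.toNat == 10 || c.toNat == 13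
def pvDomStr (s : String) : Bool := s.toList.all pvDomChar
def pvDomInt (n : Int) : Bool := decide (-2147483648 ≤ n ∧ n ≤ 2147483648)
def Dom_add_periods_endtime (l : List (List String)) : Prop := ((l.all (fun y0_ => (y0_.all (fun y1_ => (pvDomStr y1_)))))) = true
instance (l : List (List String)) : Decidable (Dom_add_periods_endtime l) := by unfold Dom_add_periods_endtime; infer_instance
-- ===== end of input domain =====

-- B replaces A's double-reverse accumulator loop by a single forward pairwise (zip) pass: idiomatic, same cost.
-- Both Pythons mutate l in place and return the same object; the equivalence proved here is about the return value.

-- ===== PORT A =====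
-- l.reverse(); old = "24:00"; for i in l: i.append(old); old = i[0]; l.reverse(); return l
-- i[0] is read after the append, so the list is nonempty and pyGet? is always some; .getD "" is unreachable.
def add_periods_endtime (l : List (List String)) : List (List String) :=
  (l.reverse.foldl
    (fun (acc : List (List String) × String) i =>
      let i2 := i ++ [acc.2]
      (acc.1 ++ [i2], (PySem.List.pyGet? i2 0).getD ""))
    ([], "24:00")).1.reverse

-- ===== PORT B =====
-- for cur, nxt in zip(l, l[1:]): cur.append(nxt[0]);  if l: l[-1].append("24:00");  return l
-- nxt[0] raises on an empty nxt; under Pre_ it is always some, .getD "" is unreachable.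
def add_periods_endtime_alt (l : List (List String)) : List (List String) :=
  (List.zipWith (fun cur nxt => cur ++ [(PySem.List.pyGet? nxt 0).getD ""])
      l (PySem.List.slice l (some 1) none))
    ++ (match l.getLast? with
        | none => []
        | some t => [t ++ ["24:00"]])

-- ===== PRECONDITION & SPEC =====
-- Pre_ excludes lists containing an empty inner list after the first entry: there A still returns a value
-- (it propagates the following end time through the empty entry), while B's nxt[0] raises IndexError.
def Pre_add_periods_endtime (l : List (List String)) : Prop := ∀ x ∈ l.drop 1, x ≠ []
instance (l : List (List String)) : Decidable (Pre_add_periods_endtime l) := by unfold Pre_add_periods_endtime; infer_instance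
def pvWitness_add_periods_endtime : List (List String) := [["09:00"], ["12:00", "x"], ["18:30"]]

def Spec_add_periods_endtime (l : List (List String)) (out : List (List String)) : Prop := out = add_periods_endtime_alt l
instance (l : List (List String)) (out : List (List String)) : Decidable (Spec_add_periods_endtime l out) := by unfold Spec_add_periods_endtime; infer_instance

-- ===== CLAIM (what is proved, stated in full; the proofs are below) =====
def Claim_equal_add_periods_endtime : Prop := ∀ (l : List (List String)), Dom_add_periods_endtime l → Pre_add_periods_endtime l → Spec_add_periods_endtime l (add_periods_endtime l)

-- ===== LEMMAS AND PROOFS =====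

-- l[1:] as drop 1
lemma slice_one (l : List (List String)) : PySem.List.slice l (some 1) none = l.drop 1 := by
  have h := PySem.List.slice_from_natCast (xs := l) (a := 1)
  simpa using h

-- the appended value f, and A's loop body, named for the proofs
def pvF (cur nxt : List String) : List String := cur ++ [(PySem.List.pyGet? nxt 0).getD ""]

def pvStep (acc : List (List String) × String) (i : List String) : List (List String) × String :=
  let i2 := i ++ [acc.2]
  (acc.1 ++ [i2], (PySem.List.pyGet? i2 0).getD "")

lemma pyGet?_append_zero (x : List String) (s : String) :
    (PySem.List.pyGet? (x ++ [s]) 0).getD "" = x.headD s := by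
  cases x with
  | nil => simp
  | cons a t => simp [PySem.List.pyGet?_zero]

-- core invariant of A's backward accumulator loop, phrased on the unreversed list via foldr
lemma key (l : List (List String)) (old : String) (h : ∀ x ∈ l, x ≠ []) :
    (l.foldr (fun x acc => pvStep acc x) ([], old)).1.reverse =
      List.zipWith pvF l (l.drop 1)
        ++ (match l.getLast? with | none => [] | some t => [t ++ [old]])
    ∧ ((l.foldr (fun x acc => pvStep acc x) ([], old)).2 = (l.headD []).headD old) := by
  induction l with
  | nil => simp
  | cons x xs ih =>
    have hx : x ≠ [] := h x (by simp)
    have hxs : ∀ y ∈ xs, y ≠ [] := fun y hy => h y (by simp [hy])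
    obtain ⟨ih1, ih2⟩ := ih hxs
    cases xs with
    | nil =>
      constructor
      · simp [pvStep]
      · simp only [List.foldr, pvStep, pyGet?_append_zero]
        cases x with
        | nil => exact absurd rfl hx
        | cons a t => simp
    | cons y ys =>
      have hy : y ≠ [] := hxs y (by simp)
      constructor
      · show ((List.foldr (fun x acc => pvStep acc x) ([], old) (y :: ys)).1
              ++ [x ++ [(List.foldr (fun x acc => pvStep acc x) ([], old) (y :: ys)).2]]).reverse = _
        rw [List.reverse_append]
        simp only [List.reverse_singleton, List.singleton_append]
        rw [ih1, ih2]
        have : x ++ [((y :: ys).headD []).headD old] = pvF x y := by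
          cases y with
          | nil => exact absurd rfl hy
          | cons a t => simp [pvF]
        rw [this]
        simp [List.getLast?_cons_cons]
      · show (PySem.List.pyGet? (x ++ [_]) 0).getD "" = _
        rw [pyGet?_append_zero]
        cases x with
        | nil => exact absurd rfl hx
        | cons a t => simp

-- ===== VERDICT (by name: the statement is the Claim_ definition above) =====
theorem add_periods_endtime_spec : Claim_equal_add_periods_endtime := by
  intro l _ hpre
  show add_periods_endtime l = add_periods_endtime_alt l
  unfold add_periods_endtime add_periods_endtime_alt
  rw [List.foldl_reverse, slice_one]
  cases l with
  | nil => simp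
  | cons x xs =>
    have hxs : ∀ y ∈ xs, y ≠ [] := by
      intro y hy; exact hpre y (by simpa using hy)
    obtain ⟨k1, k2⟩ := key xs "24:00" hxs
    show ((List.foldr (fun x acc => pvStep acc x) ([], "24:00") xs).1
            ++ [x ++ [(List.foldr (fun x acc => pvStep acc x) ([], "24:00") xs).2]]).reverse = _
    rw [List.reverse_append]
    simp only [List.reverse_singleton, List.singleton_append]
    rw [k1, k2]
    cases xs with
    | nil => simp [pvF]
    | cons y ys =>
      have hy : y ≠ [] := hxs y (by simp)
      have : x ++ [((y :: ys).headD []).headD "24:00"] = pvF x y := by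
        cases y with
        | nil => exact absurd rfl hy
        | cons a t => simp [pvF]
      rw [this]
      simp only [List.getLast?_cons_cons]
      rfl
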